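-- pv_equiv track=rewrite | github.com/GesaLoof/image_manipulation_plugin | src/image_manipulation_plugin/label_image_manipulation/label_image_manipulation.py | format_output_list
-- ===== SOURCE A (Python) =====
-- def format_output_list(output):
--     output_str = "Labels: "
--     for i, element in enumerate(output):
--         if i == 0:
--             output_str += f"\n {str(element)},"
--         elif i + 1 == len(output):
--             output_str += f" {str(element)}"
--         elif (i + 1) % 10 == 0:
--             output_str += f" {str(element)},\n"
--         else:
--             output_str += f" {str(element)},"
--     return output_str
-- ===== SOURCE B (Python) =====
-- def format_output_list(output):
--     if not output:
--         return "Labels: "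
--     groups = [output[i:i+10] for i in range(0, len(output), 10)]
--     body = ",\n".join(",".join(" " + str(e) for e in g) for g in groups)
--     return "Labels: \n" + body
-- ===== Notes on version B (the rewrite author's own statement) =====
-- stated objective: alternative
-- what changed: A builds the string in one enumerate loop branching on the index (first/last/every-10th); B splits the list into chunks of 10, renders each chunk with ','.join and joins the chunks with ',\n' under a 'Labels: \n' header.
-- intended difference: On single-element lists A returns 'Labels: \n <e>,' with a trailing comma (the i==0 branch shadows the last-element rule), while B returns 'Labels: \n <e>' without it, matching how every other list ends; the comma-free form is the intended one. — e.g. on format_output_list([5]): A returns "Labels: \n 5,", B returns "Labels: \n 5"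
import Mathlib
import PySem

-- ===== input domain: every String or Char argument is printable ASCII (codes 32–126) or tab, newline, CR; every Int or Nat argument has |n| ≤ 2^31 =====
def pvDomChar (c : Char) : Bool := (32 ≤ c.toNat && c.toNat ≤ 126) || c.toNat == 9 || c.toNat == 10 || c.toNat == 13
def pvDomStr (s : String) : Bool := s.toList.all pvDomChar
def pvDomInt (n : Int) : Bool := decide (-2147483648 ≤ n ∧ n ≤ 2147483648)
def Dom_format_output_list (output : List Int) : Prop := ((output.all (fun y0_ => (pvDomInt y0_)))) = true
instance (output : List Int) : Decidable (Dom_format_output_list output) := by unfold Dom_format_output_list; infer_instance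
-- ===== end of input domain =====

-- B replaces A's index-branching enumerate loop by chunk-of-10 splitting plus joins (alternative
-- decomposition, same cost); on single-element lists B drops A's accidental trailing comma (see D_).


-- ===== PORT A =====
-- the body of A's for-loop (one enumerate step; n = len(output))
def folStepA (n : Int) (output_str : String) (ie : Int × Int) : String :=
  if ie.1 == 0 then output_str ++ "\n " ++ PySem.Int.toStr ie.2 ++ ","
  else if ie.1 + 1 == n then output_str ++ " " ++ PySem.Int.toStr ie.2
  else if PySem.Int.mod (ie.1 + 1) 10 == 0 then output_str ++ " " ++ PySem.Int.toStr ie.2 ++ ",\n"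
  else output_str ++ " " ++ PySem.Int.toStr ie.2 ++ ","

def format_output_list (output : List Int) : String :=
  (PySem.List.enumerate output).foldl (folStepA (output.length : Int)) "Labels: "

-- ===== PORT B =====
-- [output[i:i+10] for i in range(0, len(output), 10)]
def fol_chunks (output : List Int) : List (List Int) :=
  (PySem.List.pyRange 0 (output.length : Int) 10).map
    (fun i => PySem.List.slice output (some i) (some (i + 10)))

-- ','.join(" " + str(e) for e in g)
def fol_group (g : List Int) : String :=
  PySem.Str.join "," (g.map (fun e => " " ++ PySem.Int.toStr e))

def format_output_list_alt (output : List Int) : String :=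
  if output = [] then "Labels: "
  else "Labels: \n" ++ PySem.Str.join ",\n" ((fol_chunks output).map fol_group)

-- ===== PRECONDITION & SPEC =====
-- On single-element lists A returns "Labels: \n <e>," with a trailing comma (the i==0 branch
-- shadows the last-element rule); B returns "Labels: \n <e>" without it, matching how every
-- other list ends — the comma-free form is the intended one.
def D_format_output_list (output : List Int) : Prop := output.length = 1
instance (output : List Int) : Decidable (D_format_output_list output) := by unfold D_format_output_list; infer_instance

def Spec_format_output_list (output : List Int) (out : String) : Prop := ¬ D_format_output_list output → out = format_output_list_alt output
instance (output : List Int) (out : String) : Decidable (Spec_format_output_list output out) := by unfold Spec_format_output_list; infer_instance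

def pvDiffWitness_format_output_list : List Int := [5]
def pvDiffWitnessOut_format_output_list : String × String := ("Labels: \n 5,", "Labels: \n 5")

-- ===== CLAIM (what is proved, stated in full; the proofs are below) =====
def Claim_unchanged_format_output_list : Prop := ∀ (output : List Int), Dom_format_output_list output → Spec_format_output_list output (format_output_list output)
def Claim_changed_format_output_list : Prop := Dom_format_output_list (pvDiffWitness_format_output_list) ∧ D_format_output_list (pvDiffWitness_format_output_list) ∧ format_output_list (pvDiffWitness_format_output_list) = pvDiffWitnessOut_format_output_list.1 ∧ format_output_list_alt (pvDiffWitness_format_output_list) = pvDiffWitnessOut_format_output_list.2 ∧ pvDiffWitnessOut_format_output_list.1 ≠ pvDiffWitnessOut_format_output_list.2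
def Claim_exact_format_output_list : Prop := ∀ (output : List Int), Dom_format_output_list output → D_format_output_list output → format_output_list output ≠ format_output_list_alt output

-- ===== LEMMAS AND PROOFS =====
-- the separator A writes after the element at 0-based index j (when it is neither first nor last)
def folSep (j : Nat) : String := if (j + 1) % 10 = 0 then ",\n" else ","
def folItem (e : Int) : String := " " ++ PySem.Int.toStr e

-- canonical body: items joined by position-dependent separators, no trailing separator
def folCanon : Nat → List Int → String
  | _, [] => ""
  | _, [e] => folItem e
  | j, e :: l => folItem e ++ folSep j ++ folCanon (j + 1) l

-- like folCanon but EVERY element gets its separator (a full non-final chunk)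
def folAll : Nat → List Int → String
  | _, [] => ""
  | j, e :: l => folItem e ++ folSep j ++ folAll (j + 1) l

-- recursive characterisation of B's chunking (proof-side only)
def folChunksRec (rest : List Int) : List (List Int) :=
  if h : rest = [] then []
  else rest.take 10 :: folChunksRec (rest.drop 10)
termination_by rest.length
decreasing_by
  simp only [List.length_drop]
  have : 0 < rest.length := List.length_pos_iff.mpr h
  omega

theorem fol_chunks_range (xs : List Int) :
    fol_chunks xs = (List.range ((xs.length + 9) / 10)).map
      (fun k => (xs.drop (10 * k)).take 10) := by
  unfold fol_chunks
  rw [PySem.List.pyRange_of_pos 0 (xs.length : Int) (by norm_num), List.map_map]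
  by_cases h0 : xs = []
  · subst h0; simp
  · have hn : 0 < xs.length := List.length_pos_iff.mpr h0
    rw [if_pos (by exact_mod_cast hn)]
    have hc : ((xs.length : Int) - 0 + 10 - 1) / 10 = (((xs.length + 9) / 10 : Nat) : Int) := by
      omega
    rw [hc, Int.toNat_natCast]
    apply List.map_congr_left
    intro k _
    show PySem.List.slice xs (some (0 + 10 * (k : Int))) (some (0 + 10 * (k : Int) + 10)) = _
    rw [show (0 + 10 * (k : Int)) = ((10 * k : Nat) : Int) by push_cast; ring,
      show (((10 * k : Nat) : Int) + 10) = ((10 * k : Nat) : Int) + ((10 : Nat) : Int) by norm_num,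
      PySem.List.slice_natCast_add]

theorem fol_chunks_eq_rec (N : Nat) : ∀ (xs : List Int), xs.length ≤ N →
    fol_chunks xs = folChunksRec xs := by
  induction N with
  | zero =>
    intro xs hN
    have : xs = [] := List.length_eq_zero_iff.mp (by omega)
    subst this
    rw [fol_chunks_range, folChunksRec]
    simp
  | succ N ih =>
    intro xs hN
    by_cases h0 : xs = []
    · subst h0
      rw [fol_chunks_range, folChunksRec]; simp
    · have hn : 0 < xs.length := List.length_pos_iff.mpr h0
      rw [fol_chunks_range, folChunksRec, dif_neg h0]
      have hc : (xs.length + 9) / 10 = ((xs.drop 10).length + 9) / 10 + 1 := by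
        simp only [List.length_drop]; omega
      rw [hc, List.range_succ_eq_map, List.map_cons, List.map_map]
      have hmap : List.map ((fun k => (xs.drop (10 * k)).take 10) ∘ Nat.succ)
            (List.range (((xs.drop 10).length + 9) / 10))
          = List.map (fun k => ((xs.drop 10).drop (10 * k)).take 10)
            (List.range (((xs.drop 10).length + 9) / 10)) := by
        apply List.map_congr_left
        intro k _
        show (xs.drop (10 * (k + 1))).take 10 = ((xs.drop 10).drop (10 * k)).take 10
        rw [List.drop_drop, show 10 + 10 * k = 10 * (k + 1) from by ring]
      rw [hmap, ← fol_chunks_range, ih (xs.drop 10) (by simp only [List.length_drop]; omega)]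
      congr 1

theorem folCanon_cons (j : Nat) (e : Int) (l : List Int) (h : l ≠ []) :
    folCanon j (e :: l) = folItem e ++ folSep j ++ folCanon (j + 1) l := by
  cases l with
  | nil => exact absurd rfl h
  | cons b t => rfl

theorem fol_join_one (sep a : String) : PySem.Str.join sep [a] = a := by
  apply String.toList_inj.mp
  simp [PySem.Str.toList_join, PySem.Chars.join_singleton]

theorem fol_join_cons2 (sep a b : String) (t : List String) :
    PySem.Str.join sep (a :: b :: t) = a ++ sep ++ PySem.Str.join sep (b :: t) := by
  apply String.toList_inj.mp
  simp [PySem.Str.toList_join, PySem.Chars.join_cons_cons]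

-- A's loop over the elements after the first: acc grows by folCanon j rest
theorem fol_A_tail (n : Nat) (rest : List Int) : ∀ (j : Nat) (acc : String), rest ≠ [] → 1 ≤ j →
    j + rest.length = n →
    (PySem.List.enumerate rest (j : Int)).foldl (folStepA (n : Int)) acc = acc ++ folCanon j rest := by
  induction rest with
  | nil => intro j acc h; exact absurd rfl h
  | cons e l ih =>
    intro j acc _ hj hn
    rw [PySem.List.enumerate_cons]
    cases l with
    | nil =>
      simp only [List.foldl, folStepA, folCanon, folItem]
      have h0 : ((j : Int) == 0) = false := by simp; omega
      have h1 : ((j : Int) + 1 == (n : Int)) = true := by simp at hn ⊢; omega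
      rw [h0, h1]
      simp [String.append_assoc]
    | cons b t =>
      simp only [List.foldl]
      have hlast : folStepA (n : Int) acc ((j : Int), e) = acc ++ (folItem e ++ folSep j) := by
        simp only [folStepA, folItem, folSep]
        have h0 : ((j : Int) == 0) = false := by simp; omega
        have h1 : ((j : Int) + 1 == (n : Int)) = false := by
          simp at hn ⊢; omega
        have h2 : PySem.Int.mod ((j : Int) + 1) 10 = (((j + 1) % 10 : Nat) : Int) := by
          rw [show ((j : Int) + 1) = ((j + 1 : Nat) : Int) by push_cast; ring]
          exact PySem.Int.mod_natCast (j+1) 10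
        rw [h0, h1, h2]
        by_cases hm : (j + 1) % 10 = 0
        · simp [hm, String.append_assoc]
        · have : ((((j + 1) % 10 : Nat) : Int) == 0) = false := by simp; omega
          rw [this]
          simp [hm, String.append_assoc]
      rw [hlast]
      have := ih (j + 1) (acc ++ (folItem e ++ folSep j)) (by simp) (by omega) (by simp at hn ⊢; omega)
      rw [show ((j : Int) + 1) = ((j + 1 : Nat) : Int) by push_cast; ring, this,
        folCanon_cons j e (b :: t) (by simp)]
      simp [String.append_assoc]

theorem fol_A_eq (output : List Int) (h : 2 ≤ output.length) :
    format_output_list output = "Labels: \n" ++ folCanon 0 output := by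
  match output, h with
  | e :: b :: t, _ =>
    unfold format_output_list
    rw [PySem.List.enumerate_cons]
    simp only [List.foldl]
    have hstep : folStepA ((e :: b :: t).length : Int) "Labels: " ((0 : Int), e)
        = "Labels: " ++ "\n " ++ PySem.Int.toStr e ++ "," := by
      simp [folStepA]
    rw [hstep, show ((0 : Int) + 1) = ((1 : Nat) : Int) by norm_num,
      fol_A_tail (e :: b :: t).length (b :: t) 1 _ (by simp) (by omega) (by simp; omega),
      folCanon_cons 0 e (b :: t) (by simp)]
    have : folSep 0 = "," := by decide
    rw [this, folItem]
    have hlit : ("Labels: " ++ "\n " : String) = "Labels: \n" ++ " " := by decide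
    simp only [← String.append_assoc, hlit]

-- a chunk whose internal positions never hit a multiple of 10 joins with plain commas
theorem fol_join_small (xs : List Int) : ∀ (j : Nat), xs ≠ [] →
    (∀ k, k + 1 < xs.length → (j + k + 1) % 10 ≠ 0) →
    PySem.Str.join "," (xs.map folItem) = folCanon j xs := by
  induction xs with
  | nil => intro j h; exact absurd rfl h
  | cons e l ih =>
    intro j _ hk
    cases l with
    | nil => simp [fol_join_one, folCanon]
    | cons b t =>
      rw [List.map_cons, List.map_cons, fol_join_cons2, ← List.map_cons,
        ih (j + 1) (by simp) (fun k hk2 => by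
          have := hk (k + 1) (by simp at hk2 ⊢; omega)
          intro hc; apply this; omega),
        folCanon_cons j e (b :: t) (by simp)]
      have hs : folSep j = "," := by
        have := hk 0 (by simp)
        simp only [folSep]
        rw [if_neg (by omega)]
      rw [hs]

theorem fol_canon_append (g : List Int) : ∀ (rest : List Int) (j : Nat), rest ≠ [] →
    folCanon j (g ++ rest) = folAll j g ++ folCanon (j + g.length) rest := by
  induction g with
  | nil => intro rest j _; simp [folAll]
  | cons e g' ih =>
    intro rest j h
    rw [List.cons_append, folCanon_cons j e (g' ++ rest) (by simp [h]),
      ih rest (j + 1) h, folAll,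
      show j + (e :: g').length = j + 1 + g'.length by simp; omega]
    simp [String.append_assoc]

-- a FULL chunk ending right before a multiple of 10: comma-join plus a trailing ",\n"
theorem fol_all_gen (g : List Int) : ∀ (j : Nat), g ≠ [] →
    (∀ k, k + 1 < g.length → (j + k + 1) % 10 ≠ 0) → (j + g.length) % 10 = 0 →
    folAll j g = PySem.Str.join "," (g.map folItem) ++ ",\n" := by
  induction g with
  | nil => intro j h; exact absurd rfl h
  | cons e l ih =>
    intro j _ hk hlast
    cases l with
    | nil =>
      simp only [folAll, fol_join_one, List.map_cons, List.map_nil]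
      have hs : folSep j = ",\n" := by
        simp only [folSep]; rw [if_pos (by simp at hlast; omega)]
      rw [hs]
      simp
    | cons b t =>
      rw [folAll, List.map_cons, List.map_cons, fol_join_cons2, ← List.map_cons,
        ih (j + 1) (by simp) (fun k hk2 => by
          have := hk (k + 1) (by simp at hk2 ⊢; omega)
          intro hc; apply this; omega) (by simp at hlast ⊢; omega)]
      have hs : folSep j = "," := by
        have := hk 0 (by simp)
        simp only [folSep]; rw [if_neg (by omega)]
      rw [hs]
      simp [String.append_assoc]

theorem fol_B_canon (N : Nat) : ∀ (xs : List Int) (j : Nat), xs.length ≤ N → xs ≠ [] → j % 10 = 0 →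
    PySem.Str.join ",\n" ((folChunksRec xs).map fol_group) = folCanon j xs := by
  induction N with
  | zero => intro xs j hN hne; exact absurd (List.length_eq_zero_iff.mp (by omega)) hne
  | succ N ih =>
    intro xs j hN hne hj
    rw [folChunksRec, dif_neg hne]
    by_cases hlen : xs.length ≤ 10
    · have hdrop : xs.drop 10 = [] := List.drop_eq_nil_of_le hlen
      have htake : xs.take 10 = xs := List.take_of_length_le hlen
      rw [hdrop, folChunksRec, dif_pos rfl, htake, List.map_cons, List.map_nil, fol_join_one,
        fol_group]
      exact fol_join_small xs j hne (fun k hk => by omega)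
    · rw [Nat.not_le] at hlen
      have hd : xs.drop 10 ≠ [] := by
        intro hc
        have := congrArg List.length hc
        simp at this; omega
      have hjoin : PySem.Str.join ",\n" ((folChunksRec (xs.drop 10)).map fol_group)
          = folCanon (j + 10) (xs.drop 10) := by
        apply ih (xs.drop 10) (j + 10) (by simp; omega) hd (by omega)
      -- peel one cons off fol_chunks (xs.drop 10) so fol_join_cons2 applies
      rw [folChunksRec, dif_neg hd] at hjoin ⊢
      rw [List.map_cons, List.map_cons, fol_join_cons2, ← List.map_cons, hjoin]
      have hsplit : folCanon j xs = folAll j (xs.take 10) ++ folCanon (j + 10) (xs.drop 10) := by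
        have := fol_canon_append (xs.take 10) (xs.drop 10) j hd
        rw [List.take_append_drop] at this
        rw [this, List.length_take]
        congr 2
        omega
      have hall : folAll j (xs.take 10) = fol_group (xs.take 10) ++ ",\n" := by
        rw [fol_group]
        exact fol_all_gen (xs.take 10) j
          (by intro hc; have h9 := congrArg List.length hc; rw [List.length_take] at h9; simp only [List.length_nil] at h9; omega)
          (fun k hk => by rw [List.length_take] at hk; omega)
          (by rw [List.length_take]; omega)
      rw [hsplit, hall, String.append_assoc]

theorem fol_B_eq (output : List Int) (h : output ≠ []) :
    format_output_list_alt output = "Labels: \n" ++ folCanon 0 output := by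
  rw [format_output_list_alt, if_neg h, fol_chunks_eq_rec output.length output le_rfl,
    fol_B_canon output.length output 0 le_rfl h (by omega)]

theorem fol_alt_singleton (e : Int) :
    format_output_list_alt [e] = "Labels: \n" ++ (" " ++ PySem.Int.toStr e) := by
  unfold format_output_list_alt
  rw [if_neg (by simp), fol_chunks_eq_rec 1 [e] (by simp), folChunksRec, dif_neg (by simp)]
  simp only [List.take, List.drop]
  rw [folChunksRec, dif_pos rfl, List.map_cons, List.map_nil, fol_join_one, fol_group,
    List.map_cons, List.map_nil, fol_join_one]

-- ===== VERDICT (by name: the statement is the Claim_ definition above) =====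
theorem format_output_list_spec : Claim_unchanged_format_output_list := by
  intro output _ hD
  unfold D_format_output_list at hD
  match output, hD with
  | [], _ => rfl
  | e :: b :: t, _ =>
    rw [fol_A_eq _ (by simp), fol_B_eq _ (by simp)]

theorem format_output_list_changed : Claim_changed_format_output_list := by
  unfold Claim_changed_format_output_list
  refine ⟨by decide, by decide, by decide, ?_, by decide⟩
  rw [show pvDiffWitness_format_output_list = [5] from rfl, fol_alt_singleton 5]
  decide

theorem format_output_list_tight : Claim_exact_format_output_list := by
  intro output _ hD
  unfold D_format_output_list at hD
  match output, hD with
  | [e], _ =>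
    have hA : format_output_list [e] = "Labels: " ++ "\n " ++ PySem.Int.toStr e ++ "," := by
      unfold format_output_list
      rw [PySem.List.enumerate_cons, PySem.List.enumerate_nil]
      simp [folStepA]
    rw [hA, fol_alt_singleton e]
    intro hc
    have h2 := congrArg (fun s => s.toList.length) hc
    simp only [String.toList_append, List.length_append] at h2
    rw [show ("Labels: " : String).toList.length = 8 from rfl,
      show ("\n " : String).toList.length = 2 from rfl,
      show ("," : String).toList.length = 1 from rfl,
      show ("Labels: \n" : String).toList.length = 9 from rfl,
      show (" " : String).toList.length = 1 from rfl] at h2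
    omega
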